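-- pv_equiv track=rewrite | github.com/richardnixon25/SploitGPT | training/sliver/scripts/export_dataset.py | sharegpt_to_messages
-- ===== SOURCE A (Python) =====
-- from typing import Dict, List, Any, Optional
--
-- def normalize_sharegpt(entry: Dict[str, Any]) -> Dict[str, Any]:
--     """Normalize ShareGPT format (handle both from/value and role/content)."""
--     conversations = entry.get("conversations", [])
--     normalized = []
--
--     for turn in conversations:
--         # Handle 'from'/'value' format (common in training data)
--         if "from" in turn:
--             from_val = turn.get("from", "human")
--             role = "user" if from_val in ("human", "user") else "assistant"
--             content = turn.get("value", "")
--         # Handle 'role'/'content' format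
--         else:
--             role = turn.get("role", "user")
--             content = turn.get("content", "")
--
--         normalized.append({"role": role, "content": content})
--
--     return {"conversations": normalized}
--
-- def sharegpt_to_messages(entry: Dict[str, Any], system_prompt: str = None) -> Dict[str, Any]:
--     """Convert ShareGPT format to messages format."""
--     messages = []
--
--     if system_prompt:
--         messages.append({"role": "system", "content": system_prompt})
--
--     # Normalize first to handle both from/value and role/content formats
--     normalized = normalize_sharegpt(entry)
--
--     for turn in normalized.get("conversations", []):
--         role = turn.get("role", "user")
--         content = turn.get("content", "")
--         messages.append({"role": role, "content": content})
--
--     return {"messages": messages}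
-- ===== SOURCE B (Python) =====
-- def sharegpt_to_messages(entry, system_prompt=None):
--     """Build the message list back-to-front by recursion on the tail of the
--     conversation list, then prepend the optional system message."""
--     def build(turns):
--         if not turns:
--             return []
--         t = turns[-1]
--         if "from" in t:
--             role = "user" if t.get("from", "human") in ("human", "user") else "assistant"
--             content = t.get("value", "")
--         else:
--             role = t.get("role", "user")
--             content = t.get("content", "")
--         return build(turns[:-1]) + [{"role": role, "content": content}]
--
--     messages = build(entry.get("conversations", []))
--     if system_prompt:
--         messages = [{"role": "system", "content": system_prompt}] + messages
--     return {"messages": messages}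
-- ===== Notes on version B (the rewrite author's own statement) =====
-- stated objective: alternative
-- what changed: B replaces A's two staged forward loops (normalize into an intermediate list, then copy into messages) by a single recursion that consumes the conversation list from its last element, building the output back-to-front, and prepends the system message at the end instead of appending it first.
import Mathlib
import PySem

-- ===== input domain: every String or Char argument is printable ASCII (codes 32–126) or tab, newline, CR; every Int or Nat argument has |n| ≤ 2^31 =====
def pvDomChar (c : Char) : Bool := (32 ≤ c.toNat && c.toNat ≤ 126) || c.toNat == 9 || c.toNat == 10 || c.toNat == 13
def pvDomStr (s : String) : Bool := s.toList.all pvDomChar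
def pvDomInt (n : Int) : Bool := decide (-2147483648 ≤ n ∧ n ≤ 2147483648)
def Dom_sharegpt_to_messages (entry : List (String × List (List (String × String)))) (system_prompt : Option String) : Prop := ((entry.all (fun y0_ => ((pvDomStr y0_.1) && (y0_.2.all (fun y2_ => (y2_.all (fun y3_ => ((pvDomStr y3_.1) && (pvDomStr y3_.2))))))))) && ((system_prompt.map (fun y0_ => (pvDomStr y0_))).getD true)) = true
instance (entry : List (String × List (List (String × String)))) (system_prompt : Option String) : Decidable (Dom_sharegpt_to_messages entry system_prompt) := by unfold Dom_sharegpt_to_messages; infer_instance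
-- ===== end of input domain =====

-- ===== PORT A =====
-- B replaces A's two forward passes (normalize, then copy) by one backwards recursion
-- building the message list back-to-front; same return value.

-- d.get(k, dflt) for a str->str dict as an association list (first match)
def pvGetS (d : List (String × String)) (k dflt : String) : String :=
  match d with
  | [] => dflt
  | (k', v) :: rest => if k' == k then v else pvGetS rest k dflt

-- entry.get("conversations", []) for the outer dict (first match)
def pvGetConvs (d : List (String × List (List (String × String)))) : List (List (String × String)) :=
  match d with
  | [] => []
  | (k', v) :: rest => if k' == "conversations" then v else pvGetConvs rest

-- port of normalize_sharegpt (A's helper)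
def normalize_sharegpt (entry : List (String × List (List (String × String)))) : List (String × List (List (String × String))) :=
  let conversations := pvGetConvs entry
  let normalized := conversations.foldl (fun acc turn =>
    let rc :=
      if turn.any (fun p => p.1 == "from") then
        let from_val := pvGetS turn "from" "human"
        let role := if from_val == "human" || from_val == "user" then "user" else "assistant"
        (role, pvGetS turn "value" "")
      else
        (pvGetS turn "role" "user", pvGetS turn "content" "")
    acc ++ [[("role", rc.1), ("content", rc.2)]]) []
  [("conversations", normalized)]

def sharegpt_to_messages (entry : List (String × List (List (String × String)))) (system_prompt : Option String) : List (String × List (List (String × String))) :=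
  let messages : List (List (String × String)) :=
    match system_prompt with
    | some s => if s ≠ "" then [[("role", "system"), ("content", s)]] else []
    | none => []
  let normalized := normalize_sharegpt entry
  let messages := (pvGetConvs normalized).foldl (fun acc turn =>
    acc ++ [[("role", pvGetS turn "role" "user"), ("content", pvGetS turn "content" "")]]) messages
  [("messages", messages)]

-- ===== PORT B =====
-- B's per-turn message (the body of build's non-empty case)
def pvMsgOfTurn (turn : List (String × String)) : List (String × String) :=
  if turn.any (fun p => p.1 == "from") then
    [("role", if pvGetS turn "from" "human" == "human" || pvGetS turn "from" "human" == "user" then "user" else "assistant"),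
     ("content", pvGetS turn "value" "")]
  else
    [("role", pvGetS turn "role" "user"), ("content", pvGetS turn "content" "")]

-- B's recursion: consume the LAST turn, recurse on turns[:-1], append the message
def pvBuild (turns : List (List (String × String))) : List (List (String × String)) :=
  if h : turns = [] then []
  else pvBuild turns.dropLast ++ [pvMsgOfTurn (turns.getLast h)]
termination_by turns.length
decreasing_by
  cases turns with
  | nil => exact absurd rfl h
  | cons a t => simp [List.length_dropLast]

def sharegpt_to_messages_alt (entry : List (String × List (List (String × String)))) (system_prompt : Option String) : List (String × List (List (String × String))) :=
  let messages := pvBuild (pvGetConvs entry)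
  let messages :=
    match system_prompt with
    | some s => if s ≠ "" then [[("role", "system"), ("content", s)]] ++ messages else messages
    | none => messages
  [("messages", messages)]

-- ===== PRECONDITION & SPEC =====
def Spec_sharegpt_to_messages (entry : List (String × List (List (String × String)))) (system_prompt : Option String) (out : List (String × List (List (String × String)))) : Prop := out = sharegpt_to_messages_alt entry system_prompt
instance (entry : List (String × List (List (String × String)))) (system_prompt : Option String) (out : List (String × List (List (String × String)))) : Decidable (Spec_sharegpt_to_messages entry system_prompt out) := by unfold Spec_sharegpt_to_messages; infer_instance

-- ===== CLAIM =====
def Claim_equal_sharegpt_to_messages : Prop := ∀ (entry : List (String × List (List (String × String)))) (system_prompt : Option String), Dom_sharegpt_to_messages entry system_prompt → Spec_sharegpt_to_messages entry system_prompt (sharegpt_to_messages entry system_prompt)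

-- ===== LEMMAS AND PROOFS =====

theorem pvBuild_append (xs : List (List (String × String))) (x : List (String × String)) :
    pvBuild (xs ++ [x]) = pvBuild xs ++ [pvMsgOfTurn x] := by
  rw [pvBuild]
  simp

theorem pvBuild_eq_map (xs : List (List (String × String))) : pvBuild xs = xs.map pvMsgOfTurn := by
  induction xs using List.reverseRecOn with
  | nil => rw [pvBuild]; simp
  | append_singleton ys y ih => rw [pvBuild_append, ih]; simp

-- ===== VERDICT =====
theorem sharegpt_to_messages_spec : Claim_equal_sharegpt_to_messages := by
  intro entry system_prompt _
  unfold Spec_sharegpt_to_messages sharegpt_to_messages sharegpt_to_messages_alt normalize_sharegpt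
  simp only [PySem.List.foldl_append_singleton_eq_map, pvGetConvs, pvBuild_eq_map,
    beq_self_eq_true, if_true]
  rcases system_prompt with _ | s
  · simp
    intro turn _
    by_cases h : (turn.any fun p => p.1 == "from") = true <;> simp [pvMsgOfTurn, pvGetS, h]
  · by_cases hs : s = "" <;> simp [hs] <;>
    · intro turn _
      by_cases h : (turn.any fun p => p.1 == "from") = true <;> simp [pvMsgOfTurn, pvGetS, h]
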